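-- pv_equiv track=rewrite | github.com/InciteG/Hold-Em-Sim | card.py | psreverse
-- ===== SOURCE A (Python) =====
-- def psreverse(power, suit):
--     if power == 0:
--             power = 13
--     card_rank = {
--         1 : "2",
--         2: "3",
--         3: "4",
--         4: "5",
--         5: "6",
--         6: "7",
--         7: "8",
--         8: "9",
--         9: "10",
--         10: "J",
--         11: "Q",
--         12: "K",
--         13: "A"
--         }
--     card_suit = {
--         1: "H", #hearts
--         2: "D", #diamonds
--         3: "C", #clubs
--         4: "S", #spades
--         }
--     card_id = {}
--     output = 0
--     for (n,s) in card_suit.items():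
--         for (r,d) in card_rank.items():
--             num = r + 13*(n-1)
--             f = [r,s]
--             card_id[num] = f
--
--     for (k,v) in card_id.items():
--         if v == [power, suit]:
--             output = k
--     return output
-- ===== SOURCE B (Python) =====
-- def psreverse(power, suit):
--     if power == 0:
--         power = 13
--     for n, s in enumerate(["H", "D", "C", "S"], start=1):
--         if s == suit:
--             for r in range(1, 14):
--                 if r == power:
--                     return r + 13 * (n - 1)
--     return 0
-- ===== Notes on version B (the rewrite author's own statement) =====
-- stated objective: faster
-- what changed: B computes the card index directly by scanning the 4 suits and 13 ranks with early return, instead of materialising the full 52-entry card_id dict and then linearly scanning all its items for the matching value.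
import Mathlib
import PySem

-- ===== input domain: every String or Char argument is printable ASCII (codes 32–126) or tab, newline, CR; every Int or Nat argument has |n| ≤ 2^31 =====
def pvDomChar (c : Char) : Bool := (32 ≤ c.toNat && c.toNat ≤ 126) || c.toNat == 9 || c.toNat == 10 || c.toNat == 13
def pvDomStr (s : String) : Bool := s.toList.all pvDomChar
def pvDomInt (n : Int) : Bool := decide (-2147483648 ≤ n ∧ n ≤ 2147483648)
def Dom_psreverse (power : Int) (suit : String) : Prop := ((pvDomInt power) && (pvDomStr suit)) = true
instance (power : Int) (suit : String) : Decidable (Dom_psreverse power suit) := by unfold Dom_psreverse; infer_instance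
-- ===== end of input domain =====

-- B replaces A's 52-entry dict build + full linear scan by a direct early-return search over 4 suits and 13 ranks.

-- ===== PORT A =====
def cardRankA : List (Int × String) :=
  [(1, "2"), (2, "3"), (3, "4"), (4, "5"), (5, "6"), (6, "7"), (7, "8"),
   (8, "9"), (9, "10"), (10, "J"), (11, "Q"), (12, "K"), (13, "A")]

def cardSuitA : List (Int × String) := [(1, "H"), (2, "D"), (3, "C"), (4, "S")]

def psreverse (power : Int) (suit : String) : Int :=
  let power := if power == 0 then 13 else power
  -- the Python value f = [r, s] is the heterogeneous pair (rank, suit letter); ported as Int × String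
  let card_id : PySem.Dict Int (Int × String) :=
    cardSuitA.foldl (fun d ns =>
      cardRankA.foldl (fun d rd =>
        d.insert (rd.1 + 13 * (ns.1 - 1)) (rd.1, ns.2)) d) PySem.Dict.empty
  card_id.items.foldl (fun output kv => if kv.2 == (power, suit) then kv.1 else output) 0

-- ===== PORT B =====
def bInner (power n : Int) : List Int → Option Int
  | [] => none
  | r :: rest => if r == power then some (r + 13 * (n - 1)) else bInner power n rest

def bOuter (power : Int) (suit : String) : List (Int × String) → Int
  | [] => 0
  | (n, s) :: rest =>
    if s == suit then
      match bInner power n (PySem.List.pyRange 1 14 1) with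
      | some v => v
      | none => bOuter power suit rest
    else bOuter power suit rest

def psreverse_alt (power : Int) (suit : String) : Int :=
  let power := if power == 0 then 13 else power
  bOuter power suit (PySem.List.enumerate ["H", "D", "C", "S"] 1)

-- ===== PRECONDITION & SPEC =====
def Spec_psreverse (power : Int) (suit : String) (out : Int) : Prop := out = psreverse_alt power suit
instance (power : Int) (suit : String) (out : Int) : Decidable (Spec_psreverse power suit out) := by unfold Spec_psreverse; infer_instance

-- ===== CLAIM (what is proved, stated in full; the proofs are below) =====
def Claim_equal_psreverse : Prop := ∀ (power : Int) (suit : String), Dom_psreverse power suit → Spec_psreverse power suit (psreverse power suit)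

-- ===== LEMMAS AND PROOFS =====

-- one suit block of the deck, as A's build produces it
def blockA (ℓ : String) (off : Int) : List (Int × (Int × String)) :=
  (PySem.List.pyRange 1 14 1).map (fun r => (r + off, (r, ℓ)))

set_option maxRecDepth 8000 in
theorem items_eq :
    (cardSuitA.foldl (fun d ns =>
      cardRankA.foldl (fun d rd =>
        d.insert (rd.1 + 13 * (ns.1 - 1)) (rd.1, ns.2)) d)
      (PySem.Dict.empty : PySem.Dict Int (Int × String))).items
      = ((blockA "H" 0 ++ blockA "D" 13) ++ blockA "C" 26) ++ blockA "S" 39 := by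
  decide

theorem enum4 : PySem.List.enumerate ["H","D","C","S"] 1 = [(1,"H"),(2,"D"),(3,"C"),(4,"S")] := by
  decide

-- A's value-scan over one suit block: last match wins, but each key/rank occurs once
theorem foldA_block (p : Int) (suit ℓ : String) (off : Int) (a b acc : Int) :
    ((PySem.List.pyRange a b 1).map (fun r => (r + off, (r, ℓ)))).foldl
        (fun output kv => if kv.2 == (p, suit) then kv.1 else output) acc
      = if ℓ = suit ∧ a ≤ p ∧ p < b then p + off else acc := by
  induction hn : (b - a).toNat generalizing a acc with
  | zero =>
    have hba : b ≤ a := by omega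
    rw [PySem.List.pyRange_one_eq_nil hba, List.map_nil, List.foldl_nil, if_neg]
    rintro ⟨_, h1, h2⟩; omega
  | succ n ih =>
    have hab : a < b := by omega
    rw [PySem.List.pyRange_one_cons hab, List.map_cons, List.foldl_cons,
        ih (a + 1) _ (by omega)]
    by_cases hs : ℓ = suit
    · subst hs
      simp only [beq_iff_eq, Prod.mk.injEq]
      split_ifs <;> simp_all <;> omega
    · simp only [beq_iff_eq, Prod.mk.injEq]
      split_ifs <;> simp_all

-- B's inner rank loop over range(1,14), generalized to any range
theorem bInner_spec (p n a b : Int) :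
    bInner p n (PySem.List.pyRange a b 1)
      = if a ≤ p ∧ p < b then some (p + 13 * (n - 1)) else none := by
  induction hn : (b - a).toNat generalizing a with
  | zero =>
    have hba : b ≤ a := by omega
    rw [PySem.List.pyRange_one_eq_nil hba]
    simp only [bInner]
    rw [if_neg]; rintro ⟨h1, h2⟩; omega
  | succ n' ih =>
    have hab : a < b := by omega
    rw [PySem.List.pyRange_one_cons hab]
    simp only [bInner, beq_iff_eq]
    rw [ih (a + 1) (by omega)]
    split_ifs <;> simp_all <;> omega

-- B's outer loop on the literal suit list, in closed form
theorem bOuter_closed (p : Int) (suit : String) :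
    bOuter p suit [(1,"H"),(2,"D"),(3,"C"),(4,"S")] =
      if "H" = suit then (if 1 ≤ p ∧ p < 14 then p + 13 * (1 - 1) else 0)
      else if "D" = suit then (if 1 ≤ p ∧ p < 14 then p + 13 * (2 - 1) else 0)
      else if "C" = suit then (if 1 ≤ p ∧ p < 14 then p + 13 * (3 - 1) else 0)
      else if "S" = suit then (if 1 ≤ p ∧ p < 14 then p + 13 * (4 - 1) else 0)
      else 0 := by
  simp only [bOuter, bInner_spec, beq_iff_eq]
  by_cases hb : 1 ≤ p ∧ p < 14 <;> simp [hb]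

theorem chains_eq (p : Int) (suit : String) :
    (if "S" = suit ∧ 1 ≤ p ∧ p < 14 then p + 39
     else if "C" = suit ∧ 1 ≤ p ∧ p < 14 then p + 26
     else if "D" = suit ∧ 1 ≤ p ∧ p < 14 then p + 13
     else if "H" = suit ∧ 1 ≤ p ∧ p < 14 then p + 0
     else 0)
      = (if "H" = suit then (if 1 ≤ p ∧ p < 14 then p + 13 * (1 - 1) else 0)
         else if "D" = suit then (if 1 ≤ p ∧ p < 14 then p + 13 * (2 - 1) else 0)
         else if "C" = suit then (if 1 ≤ p ∧ p < 14 then p + 13 * (3 - 1) else 0)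
         else if "S" = suit then (if 1 ≤ p ∧ p < 14 then p + 13 * (4 - 1) else 0)
         else 0) := by
  by_cases h1 : ("H":String) = suit
  · subst h1; simp
  · by_cases h2 : ("D":String) = suit
    · subst h2; simp
    · by_cases h3 : ("C":String) = suit
      · subst h3; simp
      · by_cases h4 : ("S":String) = suit
        · subst h4; simp
        · simp [h1, h2, h3, h4]

set_option maxHeartbeats 1000000 in
theorem psreverse_eq (power : Int) (suit : String) : psreverse power suit = psreverse_alt power suit := by
  unfold psreverse psreverse_alt
  simp only []
  rw [items_eq, enum4, bOuter_closed]
  rw [List.foldl_append, List.foldl_append, List.foldl_append]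
  unfold blockA
  rw [foldA_block, foldA_block, foldA_block, foldA_block]
  exact chains_eq _ suit

-- ===== VERDICT (by name: the statement is the Claim_ definition above) =====
theorem psreverse_spec : Claim_equal_psreverse := by
  intro power suit _
  exact psreverse_eq power suit
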